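-- pv_equiv track=rewrite | github.com/Carlanga213/Estrategias_Algoritmicas | Notas_Libreria/codigos_ejercicios/E05_subarreglos_en_rango.py | count_if_calls
-- ===== SOURCE A (Python) =====
-- def count_if_calls(array, min_, max_):
--     calls = 0
--     for i in range(len(array)):
--         for j in range(i, len(array)):
--             for k in range(i, j+1):
--                 calls += 1
--                 if array[k] < min_ or array[k] > max_:
--                     break
--     return calls
-- ===== SOURCE B (Python) =====
-- def count_if_calls(array, min_, max_):
--     # One backward pass: maintain nxt = index of the next out-of-range element,
--     # and add a closed-form count of inner-loop iterations for each start index i.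
--     n = len(array)
--     total = 0
--     nxt = n
--     for i in range(n - 1, -1, -1):
--         if array[i] < min_ or array[i] > max_:
--             nxt = i
--         L = nxt - i
--         total += L * (L + 1) // 2 + (n - nxt) * (L + 1)
--     return total
-- ===== Notes on version B (the rewrite author's own statement) =====
-- stated objective: faster
-- what changed: Replaced A's triple nested loop (re-scanning every window from each start index) by a single backward pass that maintains the index of the next out-of-range element and adds a closed-form arithmetic count of inner-loop iterations per start index.
import Mathlib
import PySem

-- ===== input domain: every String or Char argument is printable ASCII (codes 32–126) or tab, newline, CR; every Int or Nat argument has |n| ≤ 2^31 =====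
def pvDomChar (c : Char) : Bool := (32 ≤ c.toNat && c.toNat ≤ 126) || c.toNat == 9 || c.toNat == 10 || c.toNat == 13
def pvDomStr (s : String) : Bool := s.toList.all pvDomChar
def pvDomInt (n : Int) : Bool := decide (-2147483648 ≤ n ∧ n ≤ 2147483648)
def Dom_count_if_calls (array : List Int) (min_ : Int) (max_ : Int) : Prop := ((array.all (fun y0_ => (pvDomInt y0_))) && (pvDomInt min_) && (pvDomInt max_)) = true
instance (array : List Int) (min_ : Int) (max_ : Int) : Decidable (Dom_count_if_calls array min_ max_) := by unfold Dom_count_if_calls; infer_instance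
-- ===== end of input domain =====

-- B replaces A's cubic triple loop by one backward pass adding a closed-form count per start index (objective: faster).

-- ===== PORT A =====
-- inner k-loop with break; indices come from range(i, j+1) and are always in bounds, so pyGetD's default is never used
def pvInner (array : List Int) (min_ : Int) (max_ : Int) : List Int → Int → Int
  | [], calls => calls
  | k :: ks, calls =>
    let v := PySem.List.pyGetD array k 0
    if v < min_ || v > max_ then calls + 1
    else pvInner array min_ max_ ks (calls + 1)

def count_if_calls (array : List Int) (min_ : Int) (max_ : Int) : Int :=
  (PySem.List.pyRange 0 (array.length : Int) 1).foldl
    (fun calls i =>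
      (PySem.List.pyRange i (array.length : Int) 1).foldl
        (fun calls j => pvInner array min_ max_ (PySem.List.pyRange i (j + 1) 1) calls)
        calls)
    0

-- ===== PORT B =====
-- backward index loop 'for i in range(n-1, -1, -1)' carrying (nxt, total); indices always in bounds
def count_if_calls_alt (array : List Int) (min_ : Int) (max_ : Int) : Int :=
  let n : Int := (array.length : Int)
  ((PySem.List.pyRange (n - 1) (-1) (-1)).foldl
    (fun (st : Int × Int) i =>
      let v := PySem.List.pyGetD array i 0
      let nxt := if v < min_ || v > max_ then i else st.1
      let L := nxt - i
      (nxt, st.2 + PySem.Int.floordiv (L * (L + 1)) 2 + (n - nxt) * (L + 1)))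
    (n, 0)).2

-- ===== PRECONDITION & SPEC =====
def Spec_count_if_calls (array : List Int) (min_ : Int) (max_ : Int) (out : Int) : Prop := out = count_if_calls_alt array min_ max_
instance (array : List Int) (min_ : Int) (max_ : Int) (out : Int) : Decidable (Spec_count_if_calls array min_ max_ out) := by unfold Spec_count_if_calls; infer_instance

-- ===== CLAIM (what is proved, stated in full; the proofs are below) =====
def Claim_equal_count_if_calls : Prop := ∀ (array : List Int) (min_ : Int) (max_ : Int), Dom_count_if_calls array min_ max_ → Spec_count_if_calls array min_ max_ (count_if_calls array min_ max_)

-- ===== LEMMAS AND PROOFS =====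

-- out-of-range test
def pvOut (min_ max_ v : Int) : Bool := v < min_ || v > max_

-- inner-loop iteration count when scanning l (stop at, and count, the first out-of-range element)
def pvG (min_ max_ : Int) : List Int → Int
  | [] => 0
  | v :: vs => if pvOut min_ max_ v then 1 else 1 + pvG min_ max_ vs

-- index of the first out-of-range element of l (or l.length if none)
def pvF (min_ max_ : Int) : List Int → Int
  | [] => 0
  | v :: vs => if pvOut min_ max_ v then 0 else 1 + pvF min_ max_ vs

-- total inner iterations over all windows starting at the head of l
def pvS (min_ max_ : Int) : List Int → Int
  | [] => 0
  | v :: vs => ((v :: vs).length : Int) + (if pvOut min_ max_ v then 0 else pvS min_ max_ vs)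

-- grand total over all suffixes
def pvT (min_ max_ : Int) : List Int → Int
  | [] => 0
  | v :: vs => pvS min_ max_ (v :: vs) + pvT min_ max_ vs

-- partial sum of pvG over growing prefixes of l
def pvSum (min_ max_ : Int) (l : List Int) : Nat → Int
  | 0 => 0
  | t + 1 => pvSum min_ max_ l t + pvG min_ max_ (l.take (t + 1))

lemma fdiv_succ (F : Int) :
    PySem.Int.floordiv ((F + 1) * (F + 2)) 2
      = PySem.Int.floordiv (F * (F + 1)) 2 + (F + 1) := by
  rw [PySem.Int.floordiv_eq_ediv_of_pos (by norm_num),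
      PySem.Int.floordiv_eq_ediv_of_pos (by norm_num)]
  have h : (F + 1) * (F + 2) = F * (F + 1) + (F + 1) * 2 := by ring
  rw [h, Int.add_mul_ediv_right _ _ (by norm_num)]

lemma pvS_closed (min_ max_ : Int) (l : List Int) :
    pvS min_ max_ l
      = PySem.Int.floordiv (pvF min_ max_ l * (pvF min_ max_ l + 1)) 2
        + ((l.length : Int) - pvF min_ max_ l) * (pvF min_ max_ l + 1) := by
  induction l with
  | nil => simp [pvS, pvF, PySem.Int.floordiv]
  | cons v vs ih =>
    by_cases h : pvOut min_ max_ v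
    · simp [pvS, pvF, h, PySem.Int.floordiv]
    · have hF : pvF min_ max_ (v :: vs) = 1 + pvF min_ max_ vs := by simp [pvF, h]
      have hS : pvS min_ max_ (v :: vs) = ((vs.length : Int) + 1) + pvS min_ max_ vs := by
        simp [pvS, h]
      rw [hS, hF, ih,
        show (1 + pvF min_ max_ vs) * (1 + pvF min_ max_ vs + 1)
          = (pvF min_ max_ vs + 1) * (pvF min_ max_ vs + 2) by ring,
        fdiv_succ]
      simp only [List.length_cons]
      push_cast
      generalize PySem.Int.floordiv (pvF min_ max_ vs * (pvF min_ max_ vs + 1)) 2 = A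
      ring

-- ===== A side =====

lemma pvInner_window (array : List Int) (min_ max_ : Int) :
    ∀ (d k : Nat), k + d ≤ array.length → ∀ calls,
      pvInner array min_ max_ (PySem.List.pyRange (k : Int) ((k : Int) + (d : Int)) 1) calls
        = calls + pvG min_ max_ ((array.drop k).take d) := by
  intro d
  induction d with
  | zero =>
    intro k _ calls
    rw [PySem.List.pyRange_one_eq_nil (by omega)]
    simp [pvInner, pvG]
  | succ d ih =>
    intro k hk calls
    rw [PySem.List.pyRange_one_cons (by omega)]
    have hkl : k < array.length := by omega
    have hget : PySem.List.pyGetD array (k : Int) 0 = array[k] := by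
      simp [PySem.List.pyGetD_natCast, List.getD_eq_getElem?_getD, hkl]
    have htake : (array.drop k).take (d + 1) = array[k] :: ((array.drop (k + 1)).take d) := by
      conv_lhs => rw [← List.getElem_cons_drop hkl]
      rw [List.take_succ_cons]
    simp only [pvInner, hget]
    rw [htake]
    by_cases h : array[k] < min_ || array[k] > max_
    · rw [if_pos h]
      have : pvG min_ max_ (array[k] :: (array.drop (k + 1)).take d) = 1 := by
        simp [pvG, pvOut, h]
      omega
    · rw [if_neg h,
        show (k : Int) + ((d + 1 : Nat) : Int) = ((k + 1 : Nat) : Int) + (d : Int) by push_cast; ring,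
        show (k : Int) + 1 = ((k + 1 : Nat) : Int) by push_cast; ring,
        ih (k + 1) (by omega) (calls + 1)]
      have : pvG min_ max_ (array[k] :: (array.drop (k + 1)).take d)
          = 1 + pvG min_ max_ ((array.drop (k + 1)).take d) := by
        simp [pvG, pvOut, h]
      omega

lemma pvSum_cons (min_ max_ : Int) (v : Int) (vs : List Int) :
    ∀ t : Nat, pvSum min_ max_ (v :: vs) (t + 1)
      = if pvOut min_ max_ v then ((t : Int) + 1)
        else ((t : Int) + 1) + pvSum min_ max_ vs t := by
  intro t
  induction t with
  | zero =>
    simp only [pvSum, List.take_succ_cons, List.take_zero, pvG]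
    split <;> simp
  | succ t ih =>
    have hstep : pvSum min_ max_ (v :: vs) (t + 1 + 1)
        = pvSum min_ max_ (v :: vs) (t + 1) + pvG min_ max_ ((v :: vs).take (t + 1 + 1)) := rfl
    rw [hstep, ih, List.take_succ_cons]
    by_cases h : pvOut min_ max_ v
    · simp only [h, if_true, pvG]
      omega
    · simp only [h, Bool.false_eq_true, if_false, pvG]
      have hs : pvSum min_ max_ vs (t + 1)
          = pvSum min_ max_ vs t + pvG min_ max_ (vs.take (t + 1)) := rfl
      rw [hs]
      push_cast
      ring

lemma pvSum_self (min_ max_ : Int) (l : List Int) :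
    pvSum min_ max_ l l.length = pvS min_ max_ l := by
  induction l with
  | nil => simp [pvSum, pvS]
  | cons v vs ih =>
    rw [List.length_cons, pvSum_cons]
    by_cases h : pvOut min_ max_ v
    · simp [pvS, h]
    · simp [pvS, h, ih]

lemma pvInner_fold (array : List Int) (min_ max_ : Int) (k : Nat) :
    ∀ (t : Nat), k + t ≤ array.length → ∀ calls,
      (PySem.List.pyRange (k : Int) ((k : Int) + (t : Int)) 1).foldl
        (fun calls j => pvInner array min_ max_ (PySem.List.pyRange (k : Int) (j + 1) 1) calls)
        calls
      = calls + pvSum min_ max_ (array.drop k) t := by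
  intro t
  induction t with
  | zero =>
    intro _ calls
    rw [PySem.List.pyRange_one_eq_nil (by omega)]
    simp only [List.foldl_nil, pvSum, Int.add_zero]
  | succ t ih =>
    intro ht calls
    rw [show (k : Int) + ((t + 1 : Nat) : Int) = ((k : Int) + (t : Int)) + 1 by push_cast; ring,
      PySem.List.pyRange_one_succ_right (by omega), List.foldl_append]
    simp only [List.foldl_cons, List.foldl_nil]
    rw [ih (by omega) calls,
      show (k : Int) + (t : Int) + 1 = (k : Int) + ((t + 1 : Nat) : Int) by push_cast; ring,
      pvInner_window array min_ max_ (t + 1) k (by omega)]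
    have : pvSum min_ max_ (array.drop k) (t + 1)
        = pvSum min_ max_ (array.drop k) t + pvG min_ max_ ((array.drop k).take (t + 1)) := rfl
    omega

lemma pvOuter_fold (array : List Int) (min_ max_ : Int) :
    ∀ (d k : Nat), k + d = array.length → ∀ calls,
      (PySem.List.pyRange (k : Int) ((array.length : Nat) : Int) 1).foldl
        (fun calls i =>
          (PySem.List.pyRange i ((array.length : Nat) : Int) 1).foldl
            (fun calls j => pvInner array min_ max_ (PySem.List.pyRange i (j + 1) 1) calls)
            calls)
        calls
      = calls + pvT min_ max_ (array.drop k) := by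
  intro d
  induction d with
  | zero =>
    intro k hk calls
    rw [PySem.List.pyRange_one_eq_nil (by omega)]
    simp [pvT, List.drop_eq_nil_of_le (by omega : array.length ≤ k)]
  | succ d ih =>
    intro k hk calls
    have hkl : k < array.length := by omega
    rw [PySem.List.pyRange_one_cons (by omega)]
    simp only [List.foldl_cons]
    have hin := pvInner_fold array min_ max_ k (array.length - k) (by omega) calls
    rw [show (k : Int) + ((array.length - k : Nat) : Int) = ((array.length : Nat) : Int) by
          omega,
        show array.length - k = (array.drop k).length by simp,
        pvSum_self] at hin
    rw [hin,
      show (k : Int) + 1 = ((k + 1 : Nat) : Int) by push_cast; ring,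
      ih (k + 1) (by omega)]
    have hT : pvT min_ max_ (array.drop k)
        = pvS min_ max_ (array.drop k) + pvT min_ max_ (array.drop (k + 1)) := by
      conv_lhs => rw [← List.getElem_cons_drop hkl]
      conv_lhs => rw [pvT]
      rw [List.getElem_cons_drop hkl]
    omega

lemma countA_eq_pvT (array : List Int) (min_ max_ : Int) :
    count_if_calls array min_ max_ = pvT min_ max_ array := by
  have h := pvOuter_fold array min_ max_ array.length 0 (by omega) 0
  simpa [count_if_calls] using h

-- ===== B side =====

lemma pvB_foldr (array : List Int) (min_ max_ : Int) :
    ∀ (d k : Nat), k + d = array.length →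
      (PySem.List.pyRange (k : Int) ((array.length : Nat) : Int) 1).foldr
        (fun i (st : Int × Int) =>
          let v := PySem.List.pyGetD array i 0
          let nxt := if v < min_ || v > max_ then i else st.1
          let L := nxt - i
          (nxt, st.2 + PySem.Int.floordiv (L * (L + 1)) 2 + ((array.length : Int) - nxt) * (L + 1)))
        ((array.length : Int), 0)
      = ((k : Int) + pvF min_ max_ (array.drop k), pvT min_ max_ (array.drop k)) := by
  intro d
  induction d with
  | zero =>
    intro k hk
    rw [PySem.List.pyRange_one_eq_nil (by omega)]
    simp [pvF, pvT, List.drop_eq_nil_of_le (by omega : array.length ≤ k)]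
    omega
  | succ d ih =>
    intro k hk
    have hkl : k < array.length := by omega
    rw [PySem.List.pyRange_one_cons (by omega)]
    simp only [List.foldr_cons]
    rw [show (k : Int) + 1 = ((k + 1 : Nat) : Int) by push_cast; ring,
      ih (k + 1) (by omega)]
    have hget : PySem.List.pyGetD array (k : Int) 0 = array[k] := by
      simp [PySem.List.pyGetD_natCast, List.getD_eq_getElem?_getD, hkl]
    have hF : pvF min_ max_ (array.drop k)
        = if array[k] < min_ || array[k] > max_ then 0
          else 1 + pvF min_ max_ (array.drop (k + 1)) := by
      conv_lhs => rw [← List.getElem_cons_drop hkl]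
      simp [pvF, pvOut]
    have hT : pvT min_ max_ (array.drop k)
        = pvS min_ max_ (array.drop k) + pvT min_ max_ (array.drop (k + 1)) := by
      conv_lhs => rw [← List.getElem_cons_drop hkl]
      conv_lhs => rw [pvT]
      rw [List.getElem_cons_drop hkl]
    have hlen : ((array.drop k).length : Int) = (array.length : Int) - (k : Int) := by
      simp; omega
    simp only [hget]
    by_cases h : array[k] < min_ || array[k] > max_
    · simp only [h, if_true]
      refine Prod.ext ?_ ?_
      · simp [hF, h]
      · simp only [hT, pvS_closed, hF, h, if_true, hlen]
        push_cast
        ring_nf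
    · simp only [h, Bool.false_eq_true, if_false]
      refine Prod.ext ?_ ?_
      · simp only [hF, h, Bool.false_eq_true, if_false]; push_cast; ring
      · simp only [hT, pvS_closed, hF, h, Bool.false_eq_true, if_false, hlen]
        rw [show (((k + 1 : Nat) : Int)) + pvF min_ max_ (array.drop (k + 1)) - (k : Int)
              = 1 + pvF min_ max_ (array.drop (k + 1)) by push_cast; ring]
        push_cast
        generalize PySem.Int.floordiv
          ((1 + pvF min_ max_ (array.drop (k + 1))) * (1 + pvF min_ max_ (array.drop (k + 1)) + 1)) 2 = A
        ring

lemma countB_eq_pvT (array : List Int) (min_ max_ : Int) :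
    count_if_calls_alt array min_ max_ = pvT min_ max_ array := by
  unfold count_if_calls_alt
  dsimp only
  rw [PySem.List.pyRange_neg_one_eq_reverse, List.foldl_reverse]
  have h := pvB_foldr array min_ max_ array.length 0 (by omega)
  simp only [Nat.cast_zero, List.drop_zero] at h
  try dsimp only at h
  rw [show ((-1 : Int) + 1) = ((0 : Nat) : Int) by norm_num,
    show ((array.length : Int) - 1 + 1) = ((array.length : Nat) : Int) by ring]
  simp only [Nat.cast_zero]
  rw [h]

-- ===== VERDICT (by name: the statement is the Claim_ definition above) =====
theorem count_if_calls_spec : Claim_equal_count_if_calls := by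
  intro array min_ max_ _
  unfold Spec_count_if_calls
  rw [countA_eq_pvT, countB_eq_pvT]
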